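-- pv_equiv track=rewrite | github.com/HxPulse/AI-Connect4 | AI-Connect4.py | evaluate
-- ===== SOURCE A (Python) =====
-- def evaluate(grid, pattern):
--     # Takes a grid and an evaluation pattern
--     # Returns the score of the grid following the given pattern
--
--     score = 0
--     patterns = pattern
--     for ligne in grid:
--         for i in range(len(ligne) - 3):
--             for pattern, pattern_score in patterns:
--                 if ligne[i:i+4] == pattern:
--                     score += pattern_score
--
--     for j in range(len(grid[0])):
--         for i in range(len(grid) - 3):
--             col = [grid[i+k][j] for k in range(4)]
--             for pattern, pattern_score in patterns:
--                 if col == pattern: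
--                     score += pattern_score
--
--     for i in range(len(grid) - 3):
--         for j in range(len(grid[0]) - 3):
--             diag = [grid[i+k][j+k] for k in range(4)]
--             for pattern, pattern_score in patterns:
--                 if diag == pattern:
--                     score += pattern_score
--
--     for i in range(len(grid) - 3):
--         for j in range(3, len(grid[0])):
--             diag = [grid[i+k][j-k] for k in range(4)]
--             for pattern, pattern_score in patterns:
--                 if diag == pattern:
--                     score += pattern_score
--
--     return score
-- ===== SOURCE B (Python) =====
-- def evaluate(grid, pattern):
--     # Different decomposition: gather every 4-window via zip-sliding over rows
--     # and explicitly extracted columns, plus a row-unpacked diagonal walk, tally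
--     # the windows in a dict, then score the pattern list in one final pass.
--     windows = []
--     for row in grid:
--         windows.extend(zip(row, row[1:], row[2:], row[3:]))
--     if len(grid) >= 4:
--         width = len(grid[0])
--         for j in range(width):
--             col = [row[j] for row in grid]
--             windows.extend(zip(col, col[1:], col[2:], col[3:]))
--         for i in range(len(grid) - 3):
--             r0, r1, r2, r3 = grid[i], grid[i + 1], grid[i + 2], grid[i + 3]
--             for j in range(width - 3):
--                 windows.append((r0[j], r1[j + 1], r2[j + 2], r3[j + 3]))
--             for j in range(3, width):
--                 windows.append((r0[j], r1[j - 1], r2[j - 2], r3[j - 3]))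
--     counts = {}
--     for w in windows:
--         counts[w] = counts.get(w, 0) + 1
--     return sum(counts.get(tuple(p), 0) * score for p, score in pattern)
-- ===== Notes on version B (the rewrite author's own statement) =====
-- stated objective: faster
-- what changed: B gathers every 4-window with zip-sliding over rows and over explicitly extracted column lists plus a row-unpacked diagonal walk, tallies the windows in one dict, and then scores the pattern list in a single count*score pass, instead of A's index-loop scan of the whole pattern list for every window.
import Mathlib
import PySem

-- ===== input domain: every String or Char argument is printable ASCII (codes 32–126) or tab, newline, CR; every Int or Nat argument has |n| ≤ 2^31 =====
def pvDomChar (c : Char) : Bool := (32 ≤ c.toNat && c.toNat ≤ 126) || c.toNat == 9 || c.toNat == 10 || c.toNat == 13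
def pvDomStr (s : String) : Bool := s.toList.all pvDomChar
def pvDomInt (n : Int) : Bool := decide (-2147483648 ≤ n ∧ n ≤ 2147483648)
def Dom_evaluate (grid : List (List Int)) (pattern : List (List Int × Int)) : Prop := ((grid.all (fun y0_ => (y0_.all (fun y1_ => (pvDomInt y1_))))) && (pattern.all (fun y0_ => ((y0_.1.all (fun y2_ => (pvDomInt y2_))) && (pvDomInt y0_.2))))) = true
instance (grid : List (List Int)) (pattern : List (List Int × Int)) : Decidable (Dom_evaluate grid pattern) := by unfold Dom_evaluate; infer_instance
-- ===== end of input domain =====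

-- B gathers all 4-windows by zip-sliding over rows and extracted columns plus a
-- row-unpacked diagonal walk, tallies them in a dict, and scores the pattern
-- list in one final pass (faster in a timing run's measurement, see claim).

-- ===== PORT A =====
-- shared indexing helpers: grid[i][j] etc.; the defaults are unreachable under Pre_evaluate
def pvCell (grid : List (List Int)) (i j : Int) : Int :=
  PySem.List.pyGetD (PySem.List.pyGetD grid i []) j 0

-- [grid[i+k][j] for k in range(4)]
def pvColWin (grid : List (List Int)) (i j : Int) : List Int :=
  (PySem.List.pyRange 0 4 1).map (fun k => pvCell grid (i+k) j)

-- [grid[i+k][j+k] for k in range(4)]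
def pvDiagWin (grid : List (List Int)) (i j : Int) : List Int :=
  (PySem.List.pyRange 0 4 1).map (fun k => pvCell grid (i+k) (j+k))

-- [grid[i+k][j-k] for k in range(4)]
def pvAntiWin (grid : List (List Int)) (i j : Int) : List Int :=
  (PySem.List.pyRange 0 4 1).map (fun k => pvCell grid (i+k) (j-k))

def evaluate (grid : List (List Int)) (pattern : List (List Int × Int)) : Int :=
  let patterns := pattern
  -- row windows
  let score := grid.foldl (fun score ligne =>
    (PySem.List.pyRange 0 ((ligne.length : Int) - 3) 1).foldl (fun score i =>
      patterns.foldl (fun score q =>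
        if PySem.List.slice ligne (some i) (some (i+4)) == q.1 then score + q.2 else score) score) score) 0
  let m : Int := (PySem.List.pyGetD grid 0 []).length   -- len(grid[0])
  let n : Int := grid.length
  -- column windows
  let score := (PySem.List.pyRange 0 m 1).foldl (fun score j =>
    (PySem.List.pyRange 0 (n-3) 1).foldl (fun score i =>
      patterns.foldl (fun score q =>
        if pvColWin grid i j == q.1 then score + q.2 else score) score) score) score
  -- diagonal windows
  let score := (PySem.List.pyRange 0 (n-3) 1).foldl (fun score i =>
    (PySem.List.pyRange 0 (m-3) 1).foldl (fun score j =>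
      patterns.foldl (fun score q =>
        if pvDiagWin grid i j == q.1 then score + q.2 else score) score) score) score
  -- anti-diagonal windows
  let score := (PySem.List.pyRange 0 (n-3) 1).foldl (fun score i =>
    (PySem.List.pyRange 3 m 1).foldl (fun score j =>
      patterns.foldl (fun score q =>
        if pvAntiWin grid i j == q.1 then score + q.2 else score) score) score) score
  score

-- ===== PORT B =====
-- zip(l, l[1:], l[2:], l[3:]) rendered as 4-element lists
def zip4win (l : List Int) : List (List Int) :=
  ((l.zip (l.drop 1)).zip ((l.drop 2).zip (l.drop 3))).map
    (fun p => [p.1.1, p.1.2, p.2.1, p.2.2])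

def evaluate_alt (grid : List (List Int)) (pattern : List (List Int × Int)) : Int :=
  -- windows.extend(zip(row, row[1:], row[2:], row[3:]))
  let windows := grid.foldl (fun ws row => ws ++ zip4win row) []
  let windows :=
    if 4 ≤ grid.length then
      let width : Int := (PySem.List.pyGetD grid 0 []).length
      -- column extraction + zip-sliding
      let windows := (PySem.List.pyRange 0 width 1).foldl (fun ws j =>
        ws ++ zip4win (grid.map (fun row => PySem.List.pyGetD row j 0))) windows
      -- row-unpacked diagonal walk: r0..r3, then both diagonal directions
      (PySem.List.pyRange 0 ((grid.length : Int) - 3) 1).foldl (fun ws i =>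
        let r0 := PySem.List.pyGetD grid i []
        let r1 := PySem.List.pyGetD grid (i+1) []
        let r2 := PySem.List.pyGetD grid (i+2) []
        let r3 := PySem.List.pyGetD grid (i+3) []
        let ws := (PySem.List.pyRange 0 (width - 3) 1).foldl (fun ws j =>
          ws ++ [[PySem.List.pyGetD r0 j 0, PySem.List.pyGetD r1 (j+1) 0,
                  PySem.List.pyGetD r2 (j+2) 0, PySem.List.pyGetD r3 (j+3) 0]]) ws
        (PySem.List.pyRange 3 width 1).foldl (fun ws j =>
          ws ++ [[PySem.List.pyGetD r0 j 0, PySem.List.pyGetD r1 (j-1) 0,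
                  PySem.List.pyGetD r2 (j-2) 0, PySem.List.pyGetD r3 (j-3) 0]]) ws) windows
    else windows
  -- counts[w] = counts.get(w, 0) + 1
  let counts := windows.foldl (fun d w => d.insert w (d.getD w 0 + 1))
    (PySem.Dict.empty : PySem.Dict (List Int) Int)
  -- sum(counts.get(tuple(p), 0) * score for p, score in pattern)
  pattern.foldl (fun sc q => sc + counts.getD q.1 0 * q.2) 0

-- ===== PRECONDITION & SPEC =====
-- Pre_ excludes exactly the inputs where the Python A raises IndexError: the
-- empty grid (len(grid[0])), and, when the grid has ≥ 4 rows, ragged grids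
-- with some row shorter than row 0 (column/diagonal access walks off a row).
def Pre_evaluate (grid : List (List Int)) (pattern : List (List Int × Int)) : Prop :=
  grid ≠ [] ∧ (4 ≤ grid.length → ∀ row ∈ grid, (grid.headD []).length ≤ row.length)

instance (grid : List (List Int)) (pattern : List (List Int × Int)) : Decidable (Pre_evaluate grid pattern) := by
  unfold Pre_evaluate; infer_instance

def pvWitness_evaluate : List (List Int) × (List (List Int × Int)) :=
  ([[1, 2, 3, 4]], [([1, 2, 3, 4], 5)])

def Spec_evaluate (grid : List (List Int)) (pattern : List (List Int × Int)) (out : Int) : Prop := out = evaluate_alt grid pattern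
instance (grid : List (List Int)) (pattern : List (List Int × Int)) (out : Int) : Decidable (Spec_evaluate grid pattern out) := by unfold Spec_evaluate; infer_instance

-- ===== CLAIM (what is proved, stated in full; the proofs are below) =====
def Claim_equal_evaluate : Prop := ∀ (grid : List (List Int)) (pattern : List (List Int × Int)), Dom_evaluate grid pattern → Pre_evaluate grid pattern → Spec_evaluate grid pattern (evaluate grid pattern)

-- ===== LEMMAS AND PROOFS =====

-- score contributed by one window w against the pattern list
def pvScoreOf (ps : List (List Int × Int)) (w : List Int) : Int :=
  (ps.map (fun q => if w == q.1 then q.2 else 0)).sum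

theorem pv_patfold (ps : List (List Int × Int)) (w : List Int) (s : Int) :
    ps.foldl (fun sc q => if w == q.1 then sc + q.2 else sc) s = s + pvScoreOf ps w := by
  induction ps generalizing s with
  | nil => simp [pvScoreOf]
  | cons q ps ih =>
      rw [List.foldl_cons, ih]
      simp only [pvScoreOf, List.map_cons, List.sum_cons]
      split_ifs <;> ring

theorem pv_sum_map_add {α : Type} (l : List α) (f g : α → Int) :
    (l.map (fun x => f x + g x)).sum = (l.map f).sum + (l.map g).sum := by
  induction l with
  | nil => simp
  | cons x l ih => simp [ih]; ring

theorem pv_sum_flatMap {α β : Type} (l : List α) (f : α → List β) (g : β → Int) :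
    ((l.flatMap f).map g).sum = (l.map (fun a => ((f a).map g).sum)).sum := by
  induction l with
  | nil => simp
  | cons x l ih => simp [List.flatMap_cons, ih]

-- a doubly-nested A-phase equals init + sum of per-window scores
theorem pv_phaseA {ι κ : Type} (outer : List ι) (inner : ι → List κ)
    (f : ι → κ → List Int) (ps : List (List Int × Int)) (s : Int) :
    outer.foldl (fun sc i => (inner i).foldl (fun sc j =>
        ps.foldl (fun sc q => if f i j == q.1 then sc + q.2 else sc) sc) sc) s
    = s + (((outer.flatMap (fun i => (inner i).map (f i))).map (pvScoreOf ps)).sum) := by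
  simp only [pv_patfold, PySem.List.foldl_add, pv_sum_flatMap, List.map_map]
  rfl

-- all windows of the grid, in A's visiting order
def pvWins (grid : List (List Int)) : List (List Int) :=
  let m : Int := (PySem.List.pyGetD grid 0 []).length
  let n : Int := grid.length
  grid.flatMap (fun ligne => (PySem.List.pyRange 0 ((ligne.length : Int) - 3) 1).map
      (fun i => PySem.List.slice ligne (some i) (some (i+4))))
  ++ (PySem.List.pyRange 0 m 1).flatMap (fun j => (PySem.List.pyRange 0 (n-3) 1).map
      (fun i => pvColWin grid i j))
  ++ (PySem.List.pyRange 0 (n-3) 1).flatMap (fun i => (PySem.List.pyRange 0 (m-3) 1).map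
      (fun j => pvDiagWin grid i j))
  ++ (PySem.List.pyRange 0 (n-3) 1).flatMap (fun i => (PySem.List.pyRange 3 m 1).map
      (fun j => pvAntiWin grid i j))

theorem pv_evaluate_eq_sum (grid : List (List Int)) (ps : List (List Int × Int)) :
    evaluate grid ps = ((pvWins grid).map (pvScoreOf ps)).sum := by
  simp only [evaluate, pvWins, pv_phaseA, List.map_append, List.sum_append]
  ring

-- exchanging the two summations: per-window pattern scores = per-pattern counts
theorem pv_exchange (ps : List (List Int × Int)) (W : List (List Int)) :
    (W.map (pvScoreOf ps)).sum = (ps.map (fun q => (W.count q.1 : Int) * q.2)).sum := by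
  induction W with
  | nil => simp
  | cons w W ih =>
      simp only [List.map_cons, List.sum_cons, ih, List.count_cons]
      have hmap : (ps.map (fun q => ((W.count q.1 + if w == q.1 then 1 else 0 : Nat) : Int) * q.2))
            = ps.map (fun q => (W.count q.1 : Int) * q.2 + (if w == q.1 then q.2 else 0)) := by
        apply List.map_congr_left
        intro q _
        by_cases h : (w == q.1) = true
        · simp [h]; ring
        · simp [h]
      rw [hmap, pv_sum_map_add]
      simp only [pvScoreOf]
      ring

-- the zip-sliding window list, characterised by indices
theorem pv_zip4win_eq (l : List Int) :
    zip4win l = (List.range (l.length - 3)).map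
      (fun i => [l.getD i 0, l.getD (i+1) 0, l.getD (i+2) 0, l.getD (i+3) 0]) := by
  apply List.ext_getElem
  · simp [zip4win]; omega
  · intro i h1 h2
    simp only [zip4win, List.length_map, List.length_zip, List.length_drop, List.length_range] at h1 h2
    simp [zip4win, List.getElem_zip, List.getElem_drop, Nat.add_comm]
    and_intros <;> rw [List.getElem?_eq_getElem (by omega)] <;> rfl

theorem pv_take4 (l : List Int) (k : Nat) (h : k + 4 ≤ l.length) :
    (l.drop k).take 4 = [l.getD k 0, l.getD (k+1) 0, l.getD (k+2) 0, l.getD (k+3) 0] := by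
  apply List.ext_getElem
  · simp; omega
  · intro i h1 h2
    simp only [List.length_cons, List.length_nil] at h2
    simp only [List.getElem_take, List.getElem_drop]
    interval_cases i <;>
      · simp
        rw [List.getElem?_eq_getElem (by omega)]
        rfl

-- zip-sliding over a row IS A's per-row slice scan
theorem pv_rows_eq (ligne : List Int) :
    zip4win ligne = (PySem.List.pyRange 0 ((ligne.length : Int) - 3) 1).map
      (fun i => PySem.List.slice ligne (some i) (some (i+4))) := by
  rw [pv_zip4win_eq, PySem.List.pyRange_one, List.map_map]
  have ht : (((ligne.length : Int) - 3) - 0).toNat = ligne.length - 3 := by omega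
  rw [ht]
  apply List.map_congr_left
  intro k hk
  rw [List.mem_range] at hk
  show _ = PySem.List.slice ligne (some (0 + (k:Int))) (some (0 + (k:Int) + 4))
  rw [show ((0:Int) + (k:Int)) = ((k:Int)) by ring,
      show ((k:Int) + 4) = ((k:Int) + ((4:Nat):Int)) by norm_num,
      PySem.List.slice_natCast_add, pv_take4 _ _ (by omega)]

-- zip-sliding over an extracted column IS A's per-column index scan
theorem pv_cols_eq (grid : List (List Int)) (j : Int) :
    zip4win (grid.map (fun row => PySem.List.pyGetD row j 0))
      = (PySem.List.pyRange 0 ((grid.length:Int)-3) 1).map (fun i => pvColWin grid i j) := by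
  rw [pv_zip4win_eq, PySem.List.pyRange_one, List.map_map, List.length_map]
  have ht : (((grid.length : Int) - 3) - 0).toNat = grid.length - 3 := by omega
  rw [ht]
  apply List.map_congr_left
  intro k hk
  rw [List.mem_range] at hk
  have e : ∀ x : Nat, x < grid.length →
      (grid.map (fun row => PySem.List.pyGetD row j 0)).getD x 0
        = PySem.List.pyGetD (PySem.List.pyGetD grid (x:Int) []) j 0 := by
    intro x hx
    rw [List.getD_eq_getElem _ _ (by simpa using hx), List.getElem_map,
        PySem.List.pyGetD_natCast, List.getD_eq_getElem _ _ hx]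
  rw [e k (by omega), e (k+1) (by omega), e (k+2) (by omega), e (k+3) (by omega)]
  simp only [pvColWin, pvCell, show PySem.List.pyRange 0 4 1 = [0,1,2,3] from rfl,
    List.map_cons, List.map_nil, zero_add, add_zero]
  push_cast
  rfl

-- B's literal diagonal window IS pvDiagWin / pvAntiWin
theorem pv_diag_window (grid : List (List Int)) (i j : Int) :
    [PySem.List.pyGetD (PySem.List.pyGetD grid i []) j 0,
     PySem.List.pyGetD (PySem.List.pyGetD grid (i+1) []) (j+1) 0,
     PySem.List.pyGetD (PySem.List.pyGetD grid (i+2) []) (j+2) 0,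
     PySem.List.pyGetD (PySem.List.pyGetD grid (i+3) []) (j+3) 0] = pvDiagWin grid i j := by
  simp [pvDiagWin, pvCell, show PySem.List.pyRange 0 4 1 = [0,1,2,3] from rfl]

theorem pv_anti_window (grid : List (List Int)) (i j : Int) :
    [PySem.List.pyGetD (PySem.List.pyGetD grid i []) j 0,
     PySem.List.pyGetD (PySem.List.pyGetD grid (i+1) []) (j-1) 0,
     PySem.List.pyGetD (PySem.List.pyGetD grid (i+2) []) (j-2) 0,
     PySem.List.pyGetD (PySem.List.pyGetD grid (i+3) []) (j-3) 0] = pvAntiWin grid i j := by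
  simp [pvAntiWin, pvCell, show PySem.List.pyRange 0 4 1 = [0,1,2,3] from rfl]

-- all windows of the grid, in B's visiting order
def pvWinsB (grid : List (List Int)) : List (List Int) :=
  let rows := grid.flatMap zip4win
  if 4 ≤ grid.length then
    let m : Int := (PySem.List.pyGetD grid 0 []).length
    let n : Int := grid.length
    rows
    ++ (PySem.List.pyRange 0 m 1).flatMap (fun j =>
        zip4win (grid.map (fun row => PySem.List.pyGetD row j 0)))
    ++ (PySem.List.pyRange 0 (n-3) 1).flatMap (fun i =>
        (PySem.List.pyRange 0 (m-3) 1).map (fun j => pvDiagWin grid i j)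
        ++ (PySem.List.pyRange 3 m 1).map (fun j => pvAntiWin grid i j))
  else rows

theorem pv_alt_eq_count (grid : List (List Int)) (ps : List (List Int × Int)) :
    evaluate_alt grid ps
    = (ps.map (fun q => (((pvWinsB grid).count q.1 : Int)) * q.2)).sum := by
  simp only [evaluate_alt, pvWinsB]
  by_cases h4 : 4 ≤ grid.length
  · rw [if_pos h4, if_pos h4]
    simp only [pv_diag_window, pv_anti_window]
    simp only [PySem.List.foldl_append_singleton_eq_map, PySem.List.foldl_append_eq_flatMap,
      List.append_assoc]
    simp only [PySem.Dict.getD_foldl_insert_add_one, PySem.Dict.getD_empty]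
    simp only [List.nil_append, zero_add, PySem.List.foldl_add]
  · rw [if_neg h4, if_neg h4]
    simp only [PySem.List.foldl_append_eq_flatMap, List.nil_append]
    simp only [PySem.Dict.getD_foldl_insert_add_one, PySem.Dict.getD_empty]
    simp only [zero_add, PySem.List.foldl_add]

-- B's window list is a permutation of A's
theorem pv_winsB_perm (grid : List (List Int)) :
    (pvWinsB grid).Perm (pvWins grid) := by
  have hR : List.flatMap zip4win grid
      = List.flatMap (fun ligne => (PySem.List.pyRange 0 ((ligne.length : Int) - 3) 1).map
          (fun i => PySem.List.slice ligne (some i) (some (i+4)))) grid :=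
    congrArg (fun f => List.flatMap f grid) (funext pv_rows_eq)
  simp only [pvWinsB, pvWins]
  by_cases h4 : 4 ≤ grid.length
  · rw [if_pos h4, hR]
    have hC : (fun j => zip4win (grid.map (fun row => PySem.List.pyGetD row j 0)))
        = fun j => (PySem.List.pyRange 0 ((grid.length:Int)-3) 1).map (fun i => pvColWin grid i j) :=
      funext (pv_cols_eq grid)
    rw [hC]
    refine (List.Perm.append_left _ ((List.flatMap_append_perm _ _ _).symm)).trans
      (List.Perm.of_eq (List.append_assoc _ _ _).symm)
  · rw [if_neg h4, hR]
    have h1 : PySem.List.pyRange 0 ((grid.length:Int)-3) 1 = [] :=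
      PySem.List.pyRange_one_eq_nil (by omega)
    simp only [h1, List.map_nil, List.flatMap_nil,
      List.flatMap_eq_nil_iff.mpr (fun x _ => rfl), List.append_nil]
    exact List.Perm.refl _

-- ===== VERDICT (by name: the statement is the Claim_ definition above) =====
theorem evaluate_spec : Claim_equal_evaluate := by
  intro grid pattern _ _
  show evaluate grid pattern = evaluate_alt grid pattern
  rw [pv_evaluate_eq_sum, pv_exchange, pv_alt_eq_count]
  exact congrArg _ (List.map_congr_left (fun q _ => by
    rw [List.Perm.count_eq (pv_winsB_perm grid)]))
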